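-- pv_equiv track=rewrite | github.com/rodinopps/Codewars | Python/8 Kyu/flick-switch.py | flick_switch
-- ===== SOURCE A (Python) =====
-- def flick_switch(lst):
--     list = []
--     current = True
--     for i in lst:
--         if i == "flick":
--             current = not(current)
--             list.append(current)
--         else:
--             list.append(current)
--     return list
-- ===== SOURCE B (Python) =====
-- def flick_switch(lst):
--     counts = []
--     c = 0
--     for x in lst:
--         c += (x == "flick")
--         counts.append(c)
--     return [c % 2 == 0 for c in counts]
-- ===== Notes on version B (the rewrite author's own statement) =====
-- stated objective: alternative
-- what changed: B replaces A's mutable boolean flag with a two-pass scheme: first build the running count of 'flick' occurrences, then map each cumulative count to its parity (c % 2 == 0).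
import Mathlib
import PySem

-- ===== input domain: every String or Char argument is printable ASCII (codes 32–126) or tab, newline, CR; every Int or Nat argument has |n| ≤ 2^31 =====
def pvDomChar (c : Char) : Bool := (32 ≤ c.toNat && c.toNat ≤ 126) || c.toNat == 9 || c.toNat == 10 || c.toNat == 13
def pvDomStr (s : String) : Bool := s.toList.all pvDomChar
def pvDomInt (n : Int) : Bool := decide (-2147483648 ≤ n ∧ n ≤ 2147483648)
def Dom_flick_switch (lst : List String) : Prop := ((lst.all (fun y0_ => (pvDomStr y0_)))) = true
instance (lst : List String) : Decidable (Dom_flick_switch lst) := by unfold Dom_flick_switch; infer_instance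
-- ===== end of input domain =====

-- B builds a running count of "flick" occurrences, then maps each cumulative count to its parity.


-- ===== PORT A =====
-- A: mutable flag `current`, flipped on "flick", appended each step.
def flick_switch (lst : List String) : List Bool :=
  (lst.foldl (fun (st : List Bool × Bool) i =>
      if i == "flick" then (st.1 ++ [!st.2], !st.2)
      else (st.1 ++ [st.2], st.2)) ([], true)).1

-- ===== PORT B =====
-- B pass 1: running count of "flick" occurrences so far.
def flickCounts : List String → Int → List Int
  | [], _ => []
  | x :: xs, c =>
    let c' := c + (if x == "flick" then 1 else 0)
    c' :: flickCounts xs c'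

-- B pass 2: map each cumulative count to its parity.
def flick_switch_alt (lst : List String) : List Bool :=
  (flickCounts lst 0).map (fun c => PySem.Int.mod c 2 == 0)

-- ===== PRECONDITION & SPEC =====
def Spec_flick_switch (lst : List String) (out : List Bool) : Prop := out = flick_switch_alt lst
instance (lst : List String) (out : List Bool) : Decidable (Spec_flick_switch lst out) := by unfold Spec_flick_switch; infer_instance

-- ===== CLAIM (what is proved, stated in full; the proofs are below) =====
def Claim_equal_flick_switch : Prop := ∀ (lst : List String), Dom_flick_switch lst → Spec_flick_switch lst (flick_switch lst)

-- ===== LEMMAS AND PROOFS =====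
theorem emod2_succ (c : Int) : (((c+1) % 2 : Int) == 0) = !((c % 2 : Int) == 0) := by
  by_cases h : c % 2 = 0
  · have h1 : (c + 1) % 2 = 1 := by omega
    simp [h, h1]
  · have h0 : c % 2 = 1 := by omega
    have h1 : (c + 1) % 2 = 0 := by omega
    simp [h0, h1]

theorem mod2_succ (c : Int) : (PySem.Int.mod (c+1) 2 == 0) = !(PySem.Int.mod c 2 == 0) := by
  rw [PySem.Int.mod_eq_emod_of_pos (by norm_num : (0:Int) < 2),
      PySem.Int.mod_eq_emod_of_pos (by norm_num : (0:Int) < 2)]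
  exact emod2_succ c

theorem flick_inv (lst : List String) (acc : List Bool) (cur : Bool) (c : Int)
    (h : cur = (PySem.Int.mod c 2 == 0)) :
    (lst.foldl (fun (st : List Bool × Bool) i =>
      if i == "flick" then (st.1 ++ [!st.2], !st.2)
      else (st.1 ++ [st.2], st.2)) (acc, cur)).1
    = acc ++ (flickCounts lst c).map (fun c => PySem.Int.mod c 2 == 0) := by
  induction lst generalizing acc cur c with
  | nil => simp [flickCounts]
  | cons x xs ih =>
    simp only [List.foldl, flickCounts]
    by_cases hx : x = "flick"
    · subst hx
      simp only [beq_self_eq_true, if_pos, List.map_cons]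
      rw [ih (acc ++ [!cur]) (!cur) (c + 1) (by rw [mod2_succ, h])]
      simp [h, emod2_succ]
    · have hb : (x == "flick") = false := by simp [hx]
      simp only [hb, Bool.false_eq_true, if_false, List.map_cons]
      rw [ih (acc ++ [cur]) cur c h]
      simp [h]

-- ===== VERDICT (by name: the statement is the Claim_ definition above) =====
theorem flick_switch_spec : Claim_equal_flick_switch := by
  intro lst _
  unfold Spec_flick_switch flick_switch flick_switch_alt
  exact flick_inv lst [] true 0 (by decide)
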